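-- pv_equiv track=rewrite | github.com/zhoubaohang/MTAAL | dataset/BC6/process.py | map_id_to_text
-- ===== SOURCE A (Python) =====
-- def map_id_to_text(data_text, data_id):
--     assert len(data_text) == len(data_id)
--
--     text_id_data = []
--     for text, ids in zip(data_text, data_id):
--         label = text[1]
--         cache_ids = []
--         cnt = 0
--         if ids:
--             for l in label:
--                 if l == 'O':
--                     if len(cache_ids) and cache_ids[-1] != 'O':
--                         cnt += 1
--                     cache_ids.append('O')
--                 elif 'B-' in l:
--                     cache_ids.append(ids[cnt])
--                 elif 'I-' in l:
--                     cache_ids.append(ids[cnt])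
--         else:
--             for l in label:
--                 cache_ids.append('O')
--         text.append(cache_ids)
--         text_id_data.append(text)
--
--     return text_id_data
-- ===== SOURCE B (Python) =====
-- def map_id_to_text(data_text, data_id):
--     assert len(data_text) == len(data_id)
--     out = []
--     for text, ids in zip(data_text, data_id):
--         labels = text[1]
--         if ids:
--             # keep only recognized labels, as O/entity tokens
--             toks = [l == 'O' for l in labels
--                     if l == 'O' or 'B-' in l or 'I-' in l]
--             # group tokens into maximal runs: the k-th entity run is
--             # annotated with ids[k], runs of 'O' stay 'O'
--             cache = []
--             e = 0
--             while toks: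
--                 k = 1
--                 while k < len(toks) and toks[k] == toks[0]:
--                     k += 1
--                 if toks[0]:
--                     cache.extend(['O'] * k)
--                 else:
--                     cache.extend([ids[e]] * k)
--                     e += 1
--                 toks = toks[k:]
--         else:
--             cache = ['O'] * len(labels)
--         text.append(cache)
--         out.append(text)
--     return out
-- ===== Notes on version B (the rewrite author's own statement) =====
-- stated objective: alternative
-- what changed: Replaces A's token-by-token loop that threads a counter and re-reads cache_ids[-1] with a run-grouping algorithm: recognized labels are normalized to O/entity tokens, grouped into maximal runs, and the k-th entity run is annotated with ids[k]; Pre_ excludes the inputs where A raises (length assert, short texts, entity runs outnumbering ids) and the corner where an id equal to the padding string 'O' is consumed before the final entity run, on which A's value-keyed and B's run-keyed counter advance are both defensible.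
import Mathlib
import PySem

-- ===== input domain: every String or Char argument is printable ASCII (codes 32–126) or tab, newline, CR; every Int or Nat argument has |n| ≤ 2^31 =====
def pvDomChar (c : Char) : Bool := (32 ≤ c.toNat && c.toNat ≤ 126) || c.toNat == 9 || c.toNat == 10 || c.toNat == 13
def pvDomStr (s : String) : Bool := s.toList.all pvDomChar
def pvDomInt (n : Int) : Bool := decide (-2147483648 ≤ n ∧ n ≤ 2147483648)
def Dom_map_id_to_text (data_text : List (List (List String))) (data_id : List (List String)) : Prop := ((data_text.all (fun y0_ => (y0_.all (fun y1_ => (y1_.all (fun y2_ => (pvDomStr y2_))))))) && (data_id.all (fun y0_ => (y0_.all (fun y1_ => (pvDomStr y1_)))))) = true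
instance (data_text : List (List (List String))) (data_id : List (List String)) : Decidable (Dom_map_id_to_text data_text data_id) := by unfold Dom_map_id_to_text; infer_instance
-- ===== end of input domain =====

-- B replaces A's token-by-token loop (threading a counter and re-reading cache_ids[-1]) with a
-- run-grouping algorithm: recognized labels are normalized to O/entity tokens, grouped into
-- maximal runs, and the k-th entity run is annotated with ids[k] (objective: alternative).
-- Like A, the Python B appends the annotation list to each inner `text` list in place; the
-- equivalence proved here is about the return value.

-- ===== PORT A =====
-- inner 'if ids:' loop of A: state is (cache_ids, cnt)
def aLoop (ids : List String) : List String → List String × Int → List String × Int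
  | [], st => st
  | l :: ls, (cache, cnt) =>
    if l == "O" then
      let cnt' := if decide (cache ≠ []) && (cache.getLast? != some "O") then cnt + 1 else cnt
      aLoop ids ls (cache ++ ["O"], cnt')
    else if PySem.Str.isIn "B-" l then
      aLoop ids ls (cache ++ [(PySem.List.pyGet? ids cnt).getD ""], cnt)
    else if PySem.Str.isIn "I-" l then
      aLoop ids ls (cache ++ [(PySem.List.pyGet? ids cnt).getD ""], cnt)
    else
      aLoop ids ls (cache, cnt)

def map_id_to_text (data_text : List (List (List String))) (data_id : List (List String)) : List (List (List String)) :=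
  (data_text.zip data_id).foldl (fun acc p =>
    let text := p.1
    let ids := p.2
    let label := (PySem.List.pyGet? text 1).getD []
    let cache_ids :=
      if ids ≠ [] then (aLoop ids label ([], 0)).1
      else label.foldl (fun c _ => c ++ ["O"]) []
    acc ++ [text ++ [cache_ids]]) []

-- ===== PORT B =====
-- B's comprehension: recognized labels as tokens, true = 'O', false = entity
def bToks (labels : List String) : List Bool :=
  labels.filterMap (fun l =>
    if l == "O" then some true
    else if PySem.Str.isIn "B-" l || PySem.Str.isIn "I-" l then some false
    else none)

-- B's grouping loop: peel one maximal run of equal tokens per step; entity run e gets ids[e]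
def bGroup (ids : List String) : List Bool → Int → List String
  | [], _ => []
  | t :: ts, e =>
    let k := (ts.takeWhile (· == t)).length + 1
    let rest := ts.dropWhile (· == t)
    if t then List.replicate k "O" ++ bGroup ids rest e
    else List.replicate k ((PySem.List.pyGet? ids e).getD "") ++ bGroup ids rest (e + 1)
  termination_by ts => ts.length
  decreasing_by all_goals simpa using Nat.lt_succ_of_le (List.length_dropWhile_le _ _)

def map_id_to_text_alt (data_text : List (List (List String))) (data_id : List (List String)) : List (List (List String)) :=
  (data_text.zip data_id).map (fun p =>
    let text := p.1
    let ids := p.2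
    let labels := (PySem.List.pyGet? text 1).getD []
    let cache :=
      if ids ≠ [] then bGroup ids (bToks labels) 0
      else List.replicate labels.length "O"
    text ++ [cache])

-- ===== PRECONDITION & SPEC =====
-- number of maximal entity runs in a label list (unrecognized labels do not break a run)
def entRuns : List String → Bool → Int
  | [], _ => 0
  | l :: ls, inEnt =>
    if l == "O" then entRuns ls false
    else if PySem.Str.isIn "B-" l || PySem.Str.isIn "I-" l then
      (if inEnt then 0 else 1) + entRuns ls true
    else entRuns ls inEnt

-- Pre_ excludes (a) the inputs on which Python A raises: the assert on unequal lengths,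
-- text[1] on a text with fewer than 2 elements, and ids[cnt] once the entity runs outnumber
-- the ids; and (b) the corner where an id equal to the padding string 'O' is consumed before
-- the final entity run, on which A's counter advance (keyed off the rendered value) and B's
-- (keyed off the label runs) are both defensible readings of an unspecified input.
def Pre_map_id_to_text (data_text : List (List (List String))) (data_id : List (List String)) : Prop :=
  data_text.length = data_id.length ∧
  ∀ p ∈ data_text.zip data_id,
    2 ≤ p.1.length ∧
    (p.2 ≠ [] →
      entRuns ((PySem.List.pyGet? p.1 1).getD []) false ≤ p.2.length ∧
      ∀ k ∈ List.range p.2.length,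
        (k : Int) + 1 < entRuns ((PySem.List.pyGet? p.1 1).getD []) false →
        (PySem.List.pyGet? p.2 (k : Int)).getD "" ≠ "O")
instance (data_text : List (List (List String))) (data_id : List (List String)) : Decidable (Pre_map_id_to_text data_text data_id) := by unfold Pre_map_id_to_text; infer_instance

def pvWitness_map_id_to_text : List (List (List String)) × List (List String) :=
  ([[["w1", "w2", "w3"], ["B-G", "I-G", "O", "junk", "B-G"], ["x", "y", "z"]]], [["id:1", "id:2"]])

def Spec_map_id_to_text (data_text : List (List (List String))) (data_id : List (List String)) (out : List (List (List String))) : Prop := out = map_id_to_text_alt data_text data_id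
instance (data_text : List (List (List String))) (data_id : List (List String)) (out : List (List (List String))) : Decidable (Spec_map_id_to_text data_text data_id out) := by unfold Spec_map_id_to_text; infer_instance

-- ===== CLAIM (what is proved, stated in full; the proofs are below) =====
def Claim_equal_map_id_to_text : Prop := ∀ (data_text : List (List (List String))) (data_id : List (List String)), Dom_map_id_to_text data_text data_id → Pre_map_id_to_text data_text data_id → Spec_map_id_to_text data_text data_id (map_id_to_text data_text data_id)

-- ===== LEMMAS AND PROOFS =====

-- unfold equations for the well-founded bGroup
lemma bGroup_nil (ids : List String) (e : Int) : bGroup ids [] e = [] := by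
  rw [bGroup]

lemma bGroup_cons (ids : List String) (t : Bool) (ts : List Bool) (e : Int) :
    bGroup ids (t :: ts) e =
      if t then
        List.replicate ((ts.takeWhile (· == t)).length + 1) "O" ++
          bGroup ids (ts.dropWhile (· == t)) e
      else
        List.replicate ((ts.takeWhile (· == t)).length + 1)
            ((PySem.List.pyGet? ids e).getD "") ++
          bGroup ids (ts.dropWhile (· == t)) (e + 1) := by
  rw [bGroup]

-- token-level view of A's inner loop
def aTok (ids : List String) : List Bool → List String × Int → List String × Int
  | [], st => st
  | t :: ts, (cache, cnt) =>
    if t then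
      aTok ids ts (cache ++ ["O"],
        if decide (cache ≠ []) && (cache.getLast? != some "O") then cnt + 1 else cnt)
    else
      aTok ids ts (cache ++ [(PySem.List.pyGet? ids cnt).getD ""], cnt)

lemma aLoop_eq_aTok (ids : List String) : ∀ (ls : List String) (st : List String × Int),
    aLoop ids ls st = aTok ids (bToks ls) st := by
  intro ls
  induction ls with
  | nil => intro st; simp [aLoop, bToks, aTok]
  | cons l ls ih =>
    intro st
    obtain ⟨cache, cnt⟩ := st
    by_cases hO : l = "O"
    · subst hO
      simp [aLoop, bToks, aTok, List.filterMap_cons, ih]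
    · by_cases hB : PySem.Chars.isIn ['B', '-'] l.toList = true
      · simp [aLoop, bToks, aTok, List.filterMap_cons, ih, hO, hB]
      · by_cases hI : PySem.Chars.isIn ['I', '-'] l.toList = true
        · simp [aLoop, bToks, aTok, List.filterMap_cons, ih, hO, hB, hI]
        · simp [aLoop, bToks, aTok, List.filterMap_cons, ih, hO, hB, hI]

-- continuation of bGroup inside an entity run
def bCont (ids : List String) : List Bool → Int → List String
  | [], _ => []
  | t :: ts, e =>
    if t then "O" :: bGroup ids ts (e + 1)
    else ((PySem.List.pyGet? ids e).getD "") :: bCont ids ts e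

lemma bGroup_peelO (ids : List String) (ts : List Bool) (e : Int) :
    bGroup ids (true :: ts) e = "O" :: bGroup ids ts e := by
  cases ts with
  | nil => simp [bGroup_cons, bGroup_nil]
  | cons t ts' =>
    cases t with
    | true => simp [bGroup_cons, List.replicate_succ]
    | false => simp [bGroup_cons]

lemma bGroup_peelE (ids : List String) : ∀ (ts : List Bool) (e : Int),
    bGroup ids (false :: ts) e =
      ((PySem.List.pyGet? ids e).getD "") :: bCont ids ts e := by
  intro ts
  induction ts with
  | nil => intro e; simp [bGroup_cons, bGroup_nil, bCont]
  | cons t ts' ih =>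
    intro e
    cases t with
    | true =>
      rw [bGroup_cons]
      simp [bCont, bGroup_peelO]
    | false =>
      have h := ih e
      rw [bGroup_cons] at h ⊢
      simp only [bCont]
      simp only [List.takeWhile_cons, List.dropWhile_cons] at h ⊢
      simp [List.replicate_succ] at h ⊢
      rw [h]

-- number of entity runs in a token list (inE = currently inside a run)
def nRuns : List Bool → Bool → Nat
  | [], _ => 0
  | t :: ts, inE => if t then nRuns ts false else (if inE then 0 else 1) + nRuns ts true

lemma entRuns_eq : ∀ (ls : List String) (b : Bool),
    entRuns ls b = (nRuns (bToks ls) b : Int) := by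
  intro ls
  induction ls with
  | nil => intro b; simp [entRuns, bToks, nRuns]
  | cons l ls ih =>
    intro b
    by_cases hO : l = "O"
    · subst hO
      simp [entRuns, bToks, nRuns, List.filterMap_cons, ih]
    · by_cases hB : PySem.Chars.isIn ['B', '-'] l.toList = true
      · cases b <;> simp [entRuns, bToks, nRuns, List.filterMap_cons, ih, hO, hB]
      · by_cases hI : PySem.Chars.isIn ['I', '-'] l.toList = true
        · cases b <;> simp [entRuns, bToks, nRuns, List.filterMap_cons, ih, hO, hB, hI]
        · simp [entRuns, bToks, nRuns, List.filterMap_cons, ih, hO, hB, hI]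

lemma vk_default (ids : List String) (k : Nat) (h : ids.length ≤ k) :
    (PySem.List.pyGet? ids (k : Int)).getD "" = "" := by
  have : ¬ ((k : Int) < ids.length) := by exact_mod_cast Nat.not_lt.mpr h
  simp [PySem.List.pyGet?, PySem.List.pyIdx?, this]

lemma nRuns_false_zero : ∀ (ts : List Bool), nRuns ts false = 0 → ∀ t ∈ ts, t = true := by
  intro ts
  induction ts with
  | nil => intro _ t ht; cases ht
  | cons t ts ih =>
    intro h u hu
    cases t with
    | true =>
      simp only [nRuns, if_true] at h
      rcases List.mem_cons.mp hu with h1 | h2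
      · exact h1
      · exact ih h u h2
    | false => simp [nRuns] at h

lemma allO_aTok (ids : List String) : ∀ (ts : List Bool),
    (∀ t ∈ ts, t = true) → ∀ (cache : List String) (e : Int),
    (aTok ids ts (cache, e)).1 = cache ++ List.replicate ts.length "O" := by
  intro ts
  induction ts with
  | nil => intro _ cache e; simp [aTok]
  | cons t ts ih =>
    intro h cache e
    have ht : t = true := h t (List.mem_cons_self ..)
    subst ht
    have := ih (fun u hu => h u (List.mem_cons_of_mem _ hu)) (cache ++ ["O"])
    simp only [aTok, if_true] at *
    rw [this]
    simp [List.replicate_succ]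

lemma allO_bGroup (ids : List String) : ∀ (ts : List Bool),
    (∀ t ∈ ts, t = true) → ∀ (e : Int),
    bGroup ids ts e = List.replicate ts.length "O" := by
  intro ts
  induction ts with
  | nil => intro _ e; simp [bGroup_nil]
  | cons t ts ih =>
    intro h e
    have ht : t = true := h t (List.mem_cons_self ..)
    subst ht
    rw [bGroup_peelO, ih (fun u hu => h u (List.mem_cons_of_mem _ hu))]
    simp [List.replicate_succ]

-- main invariant: A's token loop equals B's run grouping, provided no id consumed before the
-- final entity run equals "O"
lemma aTok_eq_bGroup (ids : List String) :
    ∀ (toks : List Bool) (cache : List String) (e : Int),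
      ((cache = [] ∨ cache.getLast? = some "O") →
        (∀ n : Nat, n + 1 < nRuns toks false →
          (PySem.List.pyGet? ids (e + n)).getD "" ≠ "O") →
        (aTok ids toks (cache, e)).1 = cache ++ bGroup ids toks e) ∧
      (∀ s, cache.getLast? = some s →
        (∀ n : Nat, n < nRuns toks true →
          (PySem.List.pyGet? ids (e + n)).getD "" ≠ "O") →
        (s ≠ "O" ∨ nRuns toks true = 0) →
        (aTok ids toks (cache, e)).1 = cache ++ bCont ids toks e) := by
  intro toks
  induction toks with
  | nil =>
    intro cache e
    constructor
    · intro _ _; simp [aTok, bGroup_nil]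
    · intro s _ _ _; simp [aTok, bCont]
  | cons t ts ih =>
    intro cache e
    constructor
    · intro hc H1
      cases t with
      | true =>
        have hcond : (decide (cache ≠ []) && (cache.getLast? != some "O")) = false := by
          rcases hc with h | h <;> simp [h]
        have H1' : ∀ n : Nat, n + 1 < nRuns ts false →
            (PySem.List.pyGet? ids (e + n)).getD "" ≠ "O" := by
          intro n hn; exact H1 n (by simpa [nRuns] using hn)
        have h1 := (ih (cache ++ ["O"]) e).1 (Or.inr (by simp)) H1'
        simp only [aTok, hcond, Bool.false_eq_true, if_false, if_true] at *
        rw [h1, bGroup_peelO]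
        simp
      | false =>
        have hR : nRuns (false :: ts) false = 1 + nRuns ts true := by simp [nRuns]
        have H2 : ∀ n : Nat, n < nRuns ts true →
            (PySem.List.pyGet? ids (e + n)).getD "" ≠ "O" := by
          intro n hn; exact H1 n (by omega)
        have hdis : ((PySem.List.pyGet? ids e).getD "" ≠ "O") ∨ nRuns ts true = 0 := by
          by_cases h0 : nRuns ts true = 0
          · exact Or.inr h0
          · refine Or.inl ?_
            have := H1 0 (by omega)
            simpa using this
        have h1 := (ih (cache ++ [(PySem.List.pyGet? ids e).getD ""]) e).2
          ((PySem.List.pyGet? ids e).getD "") (by simp) H2 hdis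
        simp only [aTok, Bool.false_eq_true, if_false] at *
        rw [h1, bGroup_peelE]
        simp
    · intro s hs H2 hdis
      cases t with
      | true =>
        by_cases hsO : s = "O"
        · have h0 : nRuns ts false = 0 := by
            rcases hdis with h | h
            · exact absurd hsO h
            · simpa [nRuns] using h
          have hall := nRuns_false_zero ts h0
          have hcond : (decide (cache ≠ []) && (cache.getLast? != some "O")) = false := by
            subst hsO; simp [hs]
          simp only [aTok, hcond, Bool.false_eq_true, if_false, if_true]
          rw [allO_aTok ids ts hall, bCont]
          simp [allO_bGroup ids ts hall]
        · have hcond : (decide (cache ≠ []) && (cache.getLast? != some "O")) = true := by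
            have hne : cache ≠ [] := by intro h; simp [h] at hs
            simp [hne, hs, hsO]
          have H1' : ∀ m : Nat, m + 1 < nRuns ts false →
              (PySem.List.pyGet? ids (e + 1 + m)).getD "" ≠ "O" := by
            intro m hm
            have := H2 (m + 1) (by simpa [nRuns] using hm)
            have harith : e + ((m : Int) + 1) = e + 1 + m := by ring
            simpa [harith] using this
          have h1 := (ih (cache ++ ["O"]) (e + 1)).1 (Or.inr (by simp)) H1'
          simp only [aTok, hcond, if_true] at *
          rw [h1]
          simp [bCont]
      | false =>
        have H2' : ∀ n : Nat, n < nRuns ts true →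
            (PySem.List.pyGet? ids (e + n)).getD "" ≠ "O" := by
          intro n hn; exact H2 n (by simpa [nRuns] using hn)
        have hdis' : ((PySem.List.pyGet? ids e).getD "" ≠ "O") ∨ nRuns ts true = 0 := by
          by_cases h0 : nRuns ts true = 0
          · exact Or.inr h0
          · refine Or.inl ?_
            have := H2 0 (by simp [nRuns] at hdis ⊢; omega)
            simpa using this
        have h1 := (ih (cache ++ [(PySem.List.pyGet? ids e).getD ""]) e).2
          ((PySem.List.pyGet? ids e).getD "") (by simp) H2' hdis'
        simp only [aTok, Bool.false_eq_true, if_false] at *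
        rw [h1]
        simp [bCont]

lemma foldl_append_singleton {α β : Type} (f : α → β) : ∀ (l : List α) (acc : List β),
    l.foldl (fun a x => a ++ [f x]) acc = acc ++ l.map f := by
  intro l
  induction l with
  | nil => simp
  | cons x xs ih => intro acc; simp [List.foldl, ih]

lemma foldl_O {α : Type} : ∀ (l : List α) (acc : List String),
    l.foldl (fun c _ => c ++ ["O"]) acc = acc ++ List.replicate l.length "O" := by
  intro l
  induction l with
  | nil => simp
  | cons x xs ih =>
    intro acc
    rw [List.foldl_cons, ih]
    simp [List.replicate_succ]

-- ===== VERDICT (by name: the statement is the Claim_ definition above) =====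
theorem map_id_to_text_spec : Claim_equal_map_id_to_text := by
  intro data_text data_id _ hpre
  unfold Spec_map_id_to_text map_id_to_text map_id_to_text_alt
  rw [foldl_append_singleton]
  apply List.map_congr_left
  intro p hp
  obtain ⟨-, hpair⟩ := hpre
  obtain ⟨-, hids⟩ := hpair p hp
  by_cases hne : p.2 ≠ []
  · obtain ⟨-, hO⟩ := hids hne
    have H1 : ∀ n : Nat, n + 1 < nRuns (bToks ((PySem.List.pyGet? p.1 1).getD [])) false →
        (PySem.List.pyGet? p.2 ((0 : Int) + n)).getD "" ≠ "O" := by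
      intro n hn
      by_cases hlen : n < p.2.length
      · have := hO n (List.mem_range.mpr hlen) (by rw [entRuns_eq]; exact_mod_cast hn)
        simpa using this
      · rw [show (0 : Int) + n = (n : Int) by ring,
            vk_default p.2 n (Nat.le_of_not_lt hlen)]
        simp
    have h := (aTok_eq_bGroup p.2 (bToks ((PySem.List.pyGet? p.1 1).getD [])) [] 0).1
      (Or.inl rfl) H1
    simp only [ne_eq, hne, not_false_eq_true, if_true]
    rw [aLoop_eq_aTok, h]
    simp
  · simp only [ne_eq, hne, if_false]
    push_neg at hne
    rw [foldl_O]
    simp
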